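-- pv_equiv track=rewrite | github.com/Jay1Jung/2-bit-encoded-VCF-format | meatadata_to_hex.py | encode_gt
-- ===== SOURCE A (Python) =====
-- def encode_gt(gt_str):
--     gt = gt_str.replace('|', '/').split('/')
--
--     # When GT is Lost or malformed
--     if len(gt) != 2 or not all(g in {'0', '1'} for g in gt):
--         return 2
--
--     if gt == ['0', '0']:
--         return 0
--     elif '0' in gt and '1' in gt:
--         return 1
--     elif gt == ['1', '1']:
--         return 3
--     return 2  # fallback
-- ===== SOURCE B (Python) =====
-- def encode_gt(gt_str):
--     # Direct pattern check on the raw string: no replace/split, no intermediate list.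
--     if len(gt_str) == 3 and gt_str[0] in '01' and gt_str[1] in '/|' and gt_str[2] in '01':
--         d = (gt_str[0] == '1') + (gt_str[2] == '1')
--         return d * (d + 1) // 2   # triangular numbers 0,1,3
--     return 2
-- ===== Notes on version B (the rewrite author's own statement) =====
-- stated objective: alternative
-- what changed: B drops the replace('|','/')+split('/') list pipeline entirely: it pattern-matches the raw 3-character string (allele, separator in '/|', allele) and computes the code as the triangular number d*(d+1)//2 of the allele dosage, instead of A's normalize-split-then-compare cascade over list values.
import Mathlib
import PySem

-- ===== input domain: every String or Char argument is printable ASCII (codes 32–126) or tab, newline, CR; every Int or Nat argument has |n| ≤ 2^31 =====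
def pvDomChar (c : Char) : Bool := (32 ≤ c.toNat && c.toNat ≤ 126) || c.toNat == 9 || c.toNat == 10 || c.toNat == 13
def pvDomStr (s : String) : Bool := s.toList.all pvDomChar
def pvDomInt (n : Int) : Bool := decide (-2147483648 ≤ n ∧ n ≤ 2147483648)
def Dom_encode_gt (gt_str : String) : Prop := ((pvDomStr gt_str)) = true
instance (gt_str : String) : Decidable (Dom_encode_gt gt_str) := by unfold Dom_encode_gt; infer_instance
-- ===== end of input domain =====

-- B parses the genotype directly as a 3-character pattern (allele, separator, allele) and computes the
-- code by the triangular-number formula d*(d+1)//2 on the allele dosage — no replace/split pass (objective: alternative).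

-- ===== PORT A =====
def encode_gt (gt_str : String) : Int :=
  let gt := (PySem.Str.split? (PySem.Str.replace gt_str "|" "/") "/").getD []
  if gt.length ≠ 2 ∨ ¬ (gt.all (fun g => g == "0" || g == "1") = true) then 2
  else if gt = ["0", "0"] then 0
  else if gt.contains "0" ∧ gt.contains "1" then 1
  else if gt = ["1", "1"] then 3
  else 2

-- ===== PORT B =====
-- len(gt_str) == 3 with the three indexings is transcribed as the 3-element pattern match;
-- `ch in '01'` / `ch in '/|'` is PySem.Chars.isIn on the code points (exact).
def encode_gt_alt (gt_str : String) : Int :=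
  match gt_str.toList with
  | [a, b, c] =>
    if PySem.Chars.isIn [a] ['0', '1'] && PySem.Chars.isIn [b] ['/', '|'] && PySem.Chars.isIn [c] ['0', '1'] then
      let d : Int := (if a = '1' then 1 else 0) + (if c = '1' then 1 else 0)
      PySem.Int.floordiv (d * (d + 1)) 2
    else 2
  | _ => 2

-- ===== PRECONDITION & SPEC =====
def Spec_encode_gt (gt_str : String) (out : Int) : Prop := out = encode_gt_alt gt_str
instance (gt_str : String) (out : Int) : Decidable (Spec_encode_gt gt_str out) := by unfold Spec_encode_gt; infer_instance

-- ===== CLAIM (what is proved, stated in full; the proofs are below) =====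
def Claim_equal_encode_gt : Prop := ∀ (gt_str : String), Dom_encode_gt gt_str → Spec_encode_gt gt_str (encode_gt gt_str)

-- ===== LEMMAS AND PROOFS =====

-- the character map performed by str.replace('|', '/')
def repChar (c : Char) : Char := if c = '|' then '/' else c

-- Python-level split of the replaced string, as a structural recursion (proved equal to A's primitives below)
def mySplit : List Char → List Char → List (List Char)
  | cur, [] => [cur.reverse]
  | cur, c :: t => if c = '/' then cur.reverse :: mySplit [] t else mySplit (c :: cur) t

theorem rep_go (fuel : Nat) : ∀ (l acc : List Char), l.length ≤ fuel →
    PySem.Chars.replace.go ['|'] ['/'] fuel l acc = acc.reverse ++ l.map repChar := by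
  induction fuel with
  | zero => intro l acc h; simp at h; subst h; simp [PySem.Chars.replace.go]
  | succ n ih =>
    intro l acc h
    match l with
    | [] => simp [PySem.Chars.replace.go]
    | c :: t =>
      rw [PySem.Chars.replace.go]
      by_cases hc : c = '|'
      · subst hc; simp [List.isPrefixOf, ih t _ (by simpa using h), repChar]
      · have : List.isPrefixOf ['|'] (c :: t) = false := by
          simp [List.isPrefixOf]; exact fun h => absurd h.symm hc
        simp [this, ih t _ (by simpa using h), repChar, hc]

theorem replace_single (l : List Char) :
    PySem.Chars.replace l ['|'] ['/'] = l.map repChar := by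
  rw [PySem.Chars.replace]
  simp [rep_go l.length l [] le_rfl]

theorem split_go (fuel : Nat) : ∀ (l cur : List Char) (acc : List (List Char)), l.length < fuel →
    PySem.Chars.splitOn.go ['/'] fuel l cur acc = acc.reverse ++ mySplit cur l := by
  induction fuel with
  | zero => intro l cur acc h; omega
  | succ n ih =>
    intro l cur acc h
    match l with
    | [] =>
      rw [PySem.Chars.splitOn.go]
      all_goals first | omega | simp [mySplit]
    | c :: t =>
      rw [PySem.Chars.splitOn.go]
      by_cases hc : c = '/'
      · subst hc
        simp only [List.isPrefixOf, beq_self_eq_true, Bool.true_and, if_pos,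
          List.length_singleton, List.drop_succ_cons, List.drop_zero]
        rw [ih t [] _ (by simpa using h)]
        simp [mySplit]
      · have hp : List.isPrefixOf ['/'] (c :: t) = false := by
          simp [List.isPrefixOf]; exact fun h => absurd h.symm hc
        simp only [hp, Bool.false_eq_true, if_neg, not_false_iff]
        rw [ih t (c :: cur) _ (by simpa using h)]
        simp [mySplit, hc]

theorem splitOn_eq (l : List Char) : PySem.Chars.splitOn l ['/'] = mySplit [] l := by
  rw [PySem.Chars.splitOn, split_go (l.length + 1) l [] [] (by omega)]; simp

theorem split_replace (s : String) :
    (PySem.Str.split? (PySem.Str.replace s "|" "/") "/").getD []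
      = (mySplit [] (s.toList.map repChar)).map String.ofList := by
  rw [PySem.Str.split?, PySem.Chars.split?]
  have h1 : ("/" : String).toList = ['/'] := rfl
  have h2 : (PySem.Str.replace s "|" "/").toList = s.toList.map repChar := by
    rw [PySem.Str.toList_replace]
    exact replace_single s.toList
  simp [h1, h2, splitOn_eq]

theorem mySplit_len (l : List Char) : ∀ cur,
    ((mySplit cur l).map List.length).sum + (mySplit cur l).length
      = cur.length + l.length + 1 := by
  induction l with
  | nil => intro cur; simp [mySplit]
  | cons c t ih =>
    intro cur
    by_cases hc : c = '/'
    · subst hc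
      have e : mySplit cur ('/' :: t) = cur.reverse :: mySplit [] t := by simp [mySplit]
      rw [e]
      simp only [List.map_cons, List.sum_cons, List.length_cons, List.length_reverse]
      have h := ih []
      simp only [List.length_nil] at h
      omega
    · have e : mySplit cur (c :: t) = mySplit (c :: cur) t := by simp [mySplit, hc]
      rw [e]
      have h := ih (c :: cur)
      simp only [List.length_cons] at h ⊢
      omega

theorem repChar_ne_slash {c : Char} (h : repChar c ≠ '/') : repChar c = c := by
  unfold repChar at *
  by_cases hc : c = '|' <;> simp [hc] at h ⊢

theorem repChar_slash_iff (c : Char) : repChar c = '/' ↔ c = '/' ∨ c = '|' := by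
  unfold repChar
  by_cases hc : c = '|' <;> simp [hc]

theorem isIn_single_pair (a x y : Char) :
    PySem.Chars.isIn [a] [x, y] = true ↔ a = x ∨ a = y := by
  rw [PySem.Chars.isIn_iff_infix, List.singleton_infix_iff]
  simp

theorem beq_zero (a : Char) : (String.ofList [a] == "0") = (a == '0') := by
  by_cases h : a = '0'
  · subst h; decide
  · have h2 : String.ofList [a] ≠ "0" := by
      intro hh
      rw [show ("0" : String) = String.ofList ['0'] from rfl] at hh
      exact h (by simpa using String.ofList_inj.mp hh)
    simp [h, h2]

theorem beq_one (a : Char) : (String.ofList [a] == "1") = (a == '1') := by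
  by_cases h : a = '1'
  · subst h; decide
  · have h2 : String.ofList [a] ≠ "1" := by
      intro hh
      rw [show ("1" : String) = String.ofList ['1'] from rfl] at hh
      exact h (by simpa using String.ofList_inj.mp hh)
    simp [h, h2]

-- the two ports agree on every character list
theorem core (l : List Char) :
    (let gt := (mySplit [] (l.map repChar)).map String.ofList
     if gt.length ≠ 2 ∨ ¬ (gt.all (fun g => g == "0" || g == "1") = true) then (2 : Int)
     else if gt = ["0", "0"] then 0
     else if gt.contains "0" ∧ gt.contains "1" then 1
     else if gt = ["1", "1"] then 3
     else 2)
    =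
    (match l with
     | [a, b, c] =>
       if PySem.Chars.isIn [a] ['0', '1'] && PySem.Chars.isIn [b] ['/', '|'] && PySem.Chars.isIn [c] ['0', '1'] then
         let d : Int := (if a = '1' then 1 else 0) + (if c = '1' then 1 else 0)
         PySem.Int.floordiv (d * (d + 1)) 2
       else 2
     | _ => 2) := by
  match l with
  | [] => decide
  | [a] =>
    by_cases ha : repChar a = '/' <;> simp [mySplit, ha]
  | [a, b] =>
    by_cases ha : repChar a = '/' <;> by_cases hb : repChar b = '/' <;>
      simp [mySplit, ha, hb]
  | [a, b, c] =>
    simp only [List.map_cons, List.map_nil]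
    by_cases hb : repChar b = '/'
    · by_cases ha : repChar a = '/' <;> by_cases hc : repChar c = '/'
      · -- a, b, c all separators
        have ha' : ¬ (a = '0' ∨ a = '1') := by
          rcases (repChar_slash_iff a).mp ha with h | h <;> subst h <;> decide
        simp [mySplit, ha, hb, hc, isIn_single_pair, ha']
      · have ha' : ¬ (a = '0' ∨ a = '1') := by
          rcases (repChar_slash_iff a).mp ha with h | h <;> subst h <;> decide
        simp [mySplit, ha, hb, hc, isIn_single_pair, ha']
      · have hc' : ¬ (c = '0' ∨ c = '1') := by
          rcases (repChar_slash_iff c).mp hc with h | h <;> subst h <;> decide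
        simp [mySplit, ha, hb, hc, isIn_single_pair, hc', beq_zero, beq_one]
      · -- the genuine genotype shape: allele, separator, allele
        simp only [repChar_ne_slash ha, repChar_ne_slash hc]
        have ha2 : a ≠ '/' := fun h => ha ((repChar_slash_iff a).mpr (Or.inl h))
        have hc2 : c ≠ '/' := fun h => hc ((repChar_slash_iff c).mpr (Or.inl h))
        have hbin : b = '/' ∨ b = '|' := (repChar_slash_iff b).mp hb
        by_cases ha0 : a = '0' <;> by_cases ha1 : a = '1' <;>
          by_cases hc0 : c = '0' <;> by_cases hc1 : c = '1' <;>
          simp_all [mySplit, isIn_single_pair, beq_zero, beq_one]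
    · have hb' : ¬ (b = '/' ∨ b = '|') := fun h => hb ((repChar_slash_iff b).mpr h)
      by_cases ha : repChar a = '/' <;> by_cases hc : repChar c = '/' <;>
        simp [mySplit, ha, hb, hc, isIn_single_pair, hb', beq_zero, beq_one]
  | a :: b :: c :: d :: t =>
    -- length ≥ 4: A's guard can never pass (a valid split needs exactly 3 characters)
    set m := (a :: b :: c :: d :: t).map repChar with hm
    have hlen : m.length = t.length + 4 := by simp [hm]
    set parts := mySplit [] m with hparts
    have hsum := mySplit_len m []
    rw [← hparts] at hsum
    by_cases hg : (parts.map String.ofList).length ≠ 2 ∨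
        ¬ ((parts.map String.ofList).all (fun g => g == "0" || g == "1") = true)
    · simp only [if_pos hg]
    · exfalso
      have h2 : (parts.map String.ofList).length = 2 := not_not.mp (not_or.mp hg).1
      have hall : (parts.map String.ofList).all (fun g => g == "0" || g == "1") = true :=
        not_not.mp (not_or.mp hg).2
      simp only [List.length_map] at h2
      match parts, h2, hall, hsum with
      | [x, y], _, hall, hsum =>
        have hx : String.ofList x = "0" ∨ String.ofList x = "1" := by
          have := (List.all_eq_true.mp hall) (String.ofList x) (by simp)
          simpa using this
        have hy : String.ofList y = "0" ∨ String.ofList y = "1" := by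
          have := (List.all_eq_true.mp hall) (String.ofList y) (by simp)
          simpa using this
        have hx1 : x.length = 1 := by
          rcases hx with h | h
          · rw [show ("0" : String) = String.ofList ['0'] from rfl, String.ofList_inj] at h
            simp [h]
          · rw [show ("1" : String) = String.ofList ['1'] from rfl, String.ofList_inj] at h
            simp [h]
        have hy1 : y.length = 1 := by
          rcases hy with h | h
          · rw [show ("0" : String) = String.ofList ['0'] from rfl, String.ofList_inj] at h
            simp [h]
          · rw [show ("1" : String) = String.ofList ['1'] from rfl, String.ofList_inj] at h
            simp [h]
        simp only [List.map_cons, List.map_nil, List.sum_cons, List.sum_nil,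
          List.length_cons, List.length_nil, hx1, hy1, hlen] at hsum
        omega

-- ===== VERDICT (by name: the statement is the Claim_ definition above) =====
theorem encode_gt_spec : Claim_equal_encode_gt := by
  intro s _
  show encode_gt s = encode_gt_alt s
  unfold encode_gt encode_gt_alt
  rw [split_replace]
  exact core s.toList
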